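-- pv_equiv track=rewrite | github.com/PostHog/posthog | posthog/queries/funnels/base.py | _get_final_matching_event
-- ===== SOURCE A (Python) =====
-- def _get_final_matching_event(max_steps: int):
--     statement = None
--     for i in range(max_steps - 1, -1, -1):
--         if i == max_steps - 1:
--             statement = f"if(isNull(latest_{i}),step_{i-1}_matching_event,step_{i}_matching_event)"
--         elif i == 0:
--             statement = f"if(isNull(latest_0),(null,null,null,null),{statement})"
--         else:
--             statement = f"if(isNull(latest_{i}),step_{i-1}_matching_event,{statement})"
--     return f",{statement} as final_matching_event" if statement else ""
-- ===== SOURCE B (Python) =====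
-- def _get_final_matching_event(max_steps: int):
--     if max_steps <= 0:
--         return ""
--     parts = [
--         "if(isNull(latest_0),(null,null,null,null),"
--         if i == 0
--         else f"if(isNull(latest_{i}),step_{i-1}_matching_event,"
--         for i in range(max_steps - 1)
--     ]
--     parts.append(
--         f"if(isNull(latest_{max_steps-1}),step_{max_steps-2}_matching_event,step_{max_steps-1}_matching_event)"
--     )
--     return "," + "".join(parts) + ")" * (max_steps - 1) + " as final_matching_event"
-- ===== Notes on version B (the rewrite author's own statement) =====
-- stated objective: faster
-- what changed: Replaces the backward fold that re-wraps the whole accumulated string each iteration with a single forward pass that collects fixed-size wrapper pieces in a list, joins once, and appends all closing parens at the end.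
import Mathlib
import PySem

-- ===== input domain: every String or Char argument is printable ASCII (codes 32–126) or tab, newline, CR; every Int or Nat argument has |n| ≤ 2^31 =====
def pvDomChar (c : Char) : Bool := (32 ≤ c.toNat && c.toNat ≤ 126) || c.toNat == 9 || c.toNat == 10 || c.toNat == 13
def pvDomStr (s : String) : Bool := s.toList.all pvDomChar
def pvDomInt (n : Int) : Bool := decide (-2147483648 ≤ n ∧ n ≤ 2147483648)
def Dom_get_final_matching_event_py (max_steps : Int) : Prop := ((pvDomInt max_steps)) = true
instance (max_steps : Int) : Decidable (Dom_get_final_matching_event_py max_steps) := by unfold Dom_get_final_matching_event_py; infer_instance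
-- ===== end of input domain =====

-- B builds the nested SQL conditional in one forward pass (list of wrapper pieces + single join + all closing parens appended at the end) instead of re-wrapping the accumulated string each iteration.


-- ===== PORT A =====
def get_final_matching_event_py (max_steps : Int) : String :=
  match
    (PySem.List.pyRange (max_steps - 1) (-1) (-1)).foldl
      (fun statement i =>
        if i = max_steps - 1 then
          some ("if(isNull(latest_" ++ PySem.Int.toStr i ++ "),step_" ++ PySem.Int.toStr (i - 1) ++ "_matching_event,step_" ++ PySem.Int.toStr i ++ "_matching_event)")
        else if i = 0 then
          some ("if(isNull(latest_0),(null,null,null,null)," ++ statement.getD "" ++ ")")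
        else
          some ("if(isNull(latest_" ++ PySem.Int.toStr i ++ "),step_" ++ PySem.Int.toStr (i - 1) ++ "_matching_event," ++ statement.getD "" ++ ")"))
      none
  with
  -- Python: `f",{statement} as final_matching_event" if statement else ""`; statement is None or a nonempty string
  | none => ""
  | some s => "," ++ s ++ " as final_matching_event"

-- ===== PORT B =====
def get_final_matching_event_py_alt (max_steps : Int) : String :=
  if max_steps ≤ 0 then ""
  else
    -- parts = the comprehension over range(max_steps - 1) plus the appended innermost piece;
    -- `")" * (max_steps - 1)` ported via PySem.List.pyRepeat (exact for Python sequence repetition)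
    "," ++ PySem.Str.join ""
      ((PySem.List.pyRange 0 (max_steps - 1) 1).map (fun i =>
        if i = 0 then "if(isNull(latest_0),(null,null,null,null),"
        else "if(isNull(latest_" ++ PySem.Int.toStr i ++ "),step_" ++ PySem.Int.toStr (i - 1) ++ "_matching_event,")
      ++ ["if(isNull(latest_" ++ PySem.Int.toStr (max_steps - 1) ++ "),step_" ++ PySem.Int.toStr (max_steps - 2) ++ "_matching_event,step_" ++ PySem.Int.toStr (max_steps - 1) ++ "_matching_event)"]) ++ String.ofList (PySem.List.pyRepeat [')'] (max_steps - 1)) ++ " as final_matching_event"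

-- ===== PRECONDITION & SPEC =====
def Spec_get_final_matching_event_py (max_steps : Int) (out : String) : Prop := out = get_final_matching_event_py_alt max_steps
instance (max_steps : Int) (out : String) : Decidable (Spec_get_final_matching_event_py max_steps out) := by unfold Spec_get_final_matching_event_py; infer_instance

-- ===== CLAIM (what is proved, stated in full; the proofs are below) =====
def Claim_equal_get_final_matching_event_py : Prop := ∀ (max_steps : Int), Dom_get_final_matching_event_py max_steps → Spec_get_final_matching_event_py max_steps (get_final_matching_event_py max_steps)

-- ===== LEMMAS AND PROOFS =====

-- proof-only helpers: one wrapping prefix, their forward concatenation, and a run of closing parens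
def pvWrapL (i : Int) : String :=
  "if(isNull(latest_" ++ PySem.Int.toStr i ++ "),step_" ++ PySem.Int.toStr (i - 1) ++ "_matching_event,"

def pvF : Nat → String
  | 0 => ""
  | k + 1 => pvF k ++ pvWrapL ((k : Int) + 1)

def pvCloses : Nat → String
  | 0 => ""
  | k + 1 => pvCloses k ++ ")"

lemma pvCloses_comm (k : Nat) : ")" ++ pvCloses k = pvCloses k ++ ")" := by
  induction k with
  | zero => rfl
  | succ k ih => simp only [pvCloses, ← String.append_assoc, ih]

lemma pvOfList_replicate (k : Nat) :
    String.ofList (List.replicate k ')') = pvCloses k := by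
  induction k with
  | zero => rfl
  | succ k ih =>
    have h1 : (')' :: List.replicate k ')') = [')'] ++ List.replicate k ')' := rfl
    have h2 : String.ofList [')'] = ")" := rfl
    rw [List.replicate_succ, h1, String.ofList_append, h2, ih, pvCloses_comm]
    rfl

lemma pvCharsJoin_cons (a : List Char) (l : List (List Char)) :
    PySem.Chars.join [] (a :: l) = a ++ PySem.Chars.join [] l := by
  cases l with
  | nil => simp [PySem.Chars.join, List.intercalate]
  | cons b t => rw [PySem.Chars.join_cons_cons]; simp

lemma pvJoin_nil : PySem.Str.join "" ([] : List String) = "" := rfl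

lemma pvJoin_cons (a : String) (l : List String) :
    PySem.Str.join "" (a :: l) = a ++ PySem.Str.join "" l := by
  simp only [PySem.Str.join, String.toList_empty, List.map_cons]
  rw [pvCharsJoin_cons, String.ofList_append, String.ofList_toList]

lemma pvJoin_append (l1 l2 : List String) :
    PySem.Str.join "" (l1 ++ l2) = PySem.Str.join "" l1 ++ PySem.Str.join "" l2 := by
  induction l1 with
  | nil => rw [List.nil_append, pvJoin_nil, String.empty_append]
  | cons a t ih => simp only [List.cons_append, pvJoin_cons, ih, String.append_assoc]

-- B's forward comprehension over range(max_steps - 1), joined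
lemma pvJoin_map_pyRange (k : Nat) :
    PySem.Str.join "" ((PySem.List.pyRange 0 ((k : Int) + 1) 1).map (fun i =>
      if i = 0 then "if(isNull(latest_0),(null,null,null,null),"
      else "if(isNull(latest_" ++ PySem.Int.toStr i ++ "),step_" ++ PySem.Int.toStr (i - 1) ++ "_matching_event,"))
    = "if(isNull(latest_0),(null,null,null,null)," ++ pvF k := by
  induction k with
  | zero =>
    rw [show ((0 : Nat) : Int) + 1 = 0 + 1 by norm_num, PySem.List.pyRange_one_singleton]
    simp [pvJoin_cons, pvJoin_nil, pvF]
  | succ k ih =>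
    rw [show ((k + 1 : Nat) : Int) + 1 = ((k : Int) + 1) + 1 by push_cast; ring,
        PySem.List.pyRange_one_succ_right (by omega), List.map_append, pvJoin_append, ih]
    simp only [List.map_cons, List.map_nil, pvJoin_cons, pvJoin_nil, String.append_empty]
    rw [if_neg (by omega)]
    simp only [pvF, pvWrapL, String.append_assoc]

-- A's fold, once past the innermost step: each iteration wraps the accumulated string outward
lemma pvFold_eq (m : Int) (k : Nat) (hk : (k : Int) < m) (s : String) :
    (PySem.List.pyRange (k : Int) (-1) (-1)).foldl
      (fun statement i =>
        if i = m then
          some ("if(isNull(latest_" ++ PySem.Int.toStr i ++ "),step_" ++ PySem.Int.toStr (i - 1) ++ "_matching_event,step_" ++ PySem.Int.toStr i ++ "_matching_event)")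
        else if i = 0 then
          some ("if(isNull(latest_0),(null,null,null,null)," ++ statement.getD "" ++ ")")
        else
          some ("if(isNull(latest_" ++ PySem.Int.toStr i ++ "),step_" ++ PySem.Int.toStr (i - 1) ++ "_matching_event," ++ statement.getD "" ++ ")"))
      (some s)
    = some ("if(isNull(latest_0),(null,null,null,null)," ++ (pvF k ++ (s ++ pvCloses k)) ++ ")") := by
  induction k generalizing s with
  | zero =>
    rw [show ((0 : Nat) : Int) = 0 by rfl,
        PySem.List.pyRange_neg_one_cons (by omega), PySem.List.pyRange_neg_one_eq_nil (by omega)]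
    simp only [List.foldl_cons, List.foldl_nil, Option.getD_some]
    rw [if_neg (by omega)]
    simp [pvF, pvCloses]
  | succ k ih =>
    rw [PySem.List.pyRange_neg_one_cons (by omega), List.foldl_cons]
    simp only [Option.getD_some]
    rw [if_neg (by omega), if_neg (by omega),
        show ((k + 1 : Nat) : Int) - 1 = (k : Int) by push_cast; ring,
        ih (by omega)]
    congr 1
    simp only [pvF, pvCloses, pvWrapL, String.append_assoc, ← pvCloses_comm]
    push_cast
    rw [show ((k : Int) + 1) - 1 = (k : Int) by ring]

-- ===== VERDICT (by name: the statement is the Claim_ definition above) =====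
theorem get_final_matching_event_py_spec : Claim_equal_get_final_matching_event_py := by
  unfold Claim_equal_get_final_matching_event_py
  intro n _
  unfold Spec_get_final_matching_event_py get_final_matching_event_py get_final_matching_event_py_alt
  by_cases h0 : n ≤ 0
  · rw [PySem.List.pyRange_neg_one_eq_nil (by omega), if_pos h0]; rfl
  · by_cases h1 : n = 1
    · subst h1; decide
    · obtain ⟨k, rfl⟩ : ∃ k : Nat, n = (k : Int) + 2 := ⟨(n - 2).toNat, by omega⟩
      rw [if_neg h0]
      rw [PySem.List.pyRange_neg_one_cons (by omega), List.foldl_cons, if_pos rfl]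
      rw [show (k : Int) + 2 - 1 - 1 = (k : Int) by ring]
      rw [show (k : Int) + 2 - 2 = (k : Int) by ring]
      rw [show (k : Int) + 2 - 1 = (k : Int) + 1 by ring]
      rw [pvFold_eq ((k : Int) + 1) k (by omega) _]
      rw [pvJoin_append, pvJoin_map_pyRange k]
      rw [PySem.List.pyRepeat_singleton, show ((k : Int) + 1).toNat = k + 1 by omega,
          pvOfList_replicate]
      simp only [pvJoin_cons, pvJoin_nil, String.append_empty]
      simp only [pvCloses, ← pvCloses_comm, String.append_assoc]
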